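-- pv_equiv track=rewrite | github.com/krishnakumar2453/strands-extractor-graphagent | compare.py | compare_vocabularies
-- ===== SOURCE A (Python) =====
-- def compare_vocabularies(
--     baseline: dict[str, list[str]],
--     new: dict[str, list[str]],
-- ) -> tuple[list[str], list[str], list[tuple[str, list[str], list[str]]]]:
--     """
--     Compare baseline vs new. Return (missed_roots, extra_roots, different).
--     different is list of (root, missed_forms, extra_forms).
--     """
--     baseline_roots = set(baseline)
--     new_roots = set(new)
--     missed_roots = sorted(baseline_roots - new_roots)
--     extra_roots = sorted(new_roots - baseline_roots)
--     different: list[tuple[str, list[str], list[str]]] = []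
--     for root in sorted(baseline_roots & new_roots):
--         b_forms = set(baseline[root])
--         n_forms = set(new[root])
--         if b_forms != n_forms:
--             missed_forms = sorted(b_forms - n_forms)
--             extra_forms = sorted(n_forms - b_forms)
--             different.append((root, missed_forms, extra_forms))
--     return missed_roots, extra_roots, different
-- ===== SOURCE B (Python) =====
-- def compare_vocabularies(
--     baseline: dict[str, list[str]],
--     new: dict[str, list[str]],
-- ) -> tuple[list[str], list[str], list[tuple[str, list[str], list[str]]]]:
--     """Two-pointer merge over the sorted key lists: one ordered pass yields
--     missed_roots, extra_roots and the per-root form differences."""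
--     b_keys = sorted(baseline)
--     n_keys = sorted(new)
--     missed_roots: list[str] = []
--     extra_roots: list[str] = []
--     different: list[tuple[str, list[str], list[str]]] = []
--     i = j = 0
--     while i < len(b_keys) and j < len(n_keys):
--         bk, nk = b_keys[i], n_keys[j]
--         if bk < nk:
--             missed_roots.append(bk)
--             i += 1
--         elif nk < bk:
--             extra_roots.append(nk)
--             j += 1
--         else:
--             b_forms = set(baseline[bk])
--             n_forms = set(new[bk])
--             if b_forms != n_forms:
--                 different.append((bk, sorted(b_forms - n_forms), sorted(n_forms - b_forms)))
--             i += 1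
--             j += 1
--     missed_roots.extend(b_keys[i:])
--     extra_roots.extend(n_keys[j:])
--     return missed_roots, extra_roots, different
-- ===== Notes on version B (the rewrite author's own statement) =====
-- stated objective: alternative
-- what changed: Replaces the three hash-set differences plus three sorts over roots by a single two-pointer merge walk over the two sorted key lists that classifies each root (missed / extra / shared-and-compared) in one ordered pass.
import Mathlib
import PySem

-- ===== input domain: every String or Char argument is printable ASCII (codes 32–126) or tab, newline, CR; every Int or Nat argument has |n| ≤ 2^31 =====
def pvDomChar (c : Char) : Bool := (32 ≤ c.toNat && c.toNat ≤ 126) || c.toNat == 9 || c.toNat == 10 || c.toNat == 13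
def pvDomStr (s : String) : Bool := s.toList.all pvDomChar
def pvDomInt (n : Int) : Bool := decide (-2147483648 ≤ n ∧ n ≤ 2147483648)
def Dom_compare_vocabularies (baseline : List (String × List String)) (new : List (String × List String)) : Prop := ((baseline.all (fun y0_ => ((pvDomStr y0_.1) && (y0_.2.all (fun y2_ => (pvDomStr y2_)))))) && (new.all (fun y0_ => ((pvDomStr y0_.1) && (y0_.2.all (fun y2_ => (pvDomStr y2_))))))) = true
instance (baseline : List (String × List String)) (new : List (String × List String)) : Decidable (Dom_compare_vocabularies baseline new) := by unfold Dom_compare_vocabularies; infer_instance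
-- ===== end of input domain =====

-- B replaces A's three hash-set differences over roots (plus three sorts) by a single two-pointer
-- merge walk over the two sorted key lists; objective: alternative (same asymptotic cost).

-- ===== PORT A =====
-- the dict parameters arrive as association lists; PySem.Dict.ofList is exactly Python's dict(pairs)
def compare_vocabularies (baseline : List (String × List String)) (new : List (String × List String)) : List String × List String × (List (String × List String × List String)) :=
  let bd := PySem.Dict.ofList baseline
  let nd := PySem.Dict.ofList new
  let baseline_roots : PySem.Set String := PySem.Set.ofList bd.keys
  let new_roots : PySem.Set String := PySem.Set.ofList nd.keys
  let missed_roots := PySem.List.sorted (PySem.Set.diff baseline_roots new_roots) (fun x => x)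
  let extra_roots := PySem.List.sorted (PySem.Set.diff new_roots baseline_roots) (fun x => x)
  let different := (PySem.List.sorted (PySem.Set.inter baseline_roots new_roots) (fun x => x)).foldl
    (fun acc root =>
      let b_forms := PySem.Set.ofList (bd.getD root [])
      let n_forms := PySem.Set.ofList (nd.getD root [])
      if !(PySem.Set.equal b_forms n_forms) then
        acc ++ [(root, PySem.List.sorted (PySem.Set.diff b_forms n_forms) (fun x => x),
                       PySem.List.sorted (PySem.Set.diff n_forms b_forms) (fun x => x))]
      else acc) []
  (missed_roots, extra_roots, different)

-- ===== PORT B =====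
-- the while loop of Source B: two-pointer walk over the two sorted key lists, appending accumulators
def cvLoop (bd nd : PySem.Dict String (List String)) :
    List String → List String → List String → List String →
    List (String × List String × List String) →
    List String × List String × (List (String × List String × List String))
  | [], n_keys, missed, extra, different => (missed, extra ++ n_keys, different)
  | b_keys, [], missed, extra, different => (missed ++ b_keys, extra, different)
  | bk :: bs, nk :: ns, missed, extra, different =>
    if bk < nk then
      cvLoop bd nd bs (nk :: ns) (missed ++ [bk]) extra different
    else if nk < bk then
      cvLoop bd nd (bk :: bs) ns missed (extra ++ [nk]) different
    else
      let b_forms := PySem.Set.ofList (bd.getD bk [])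
      let n_forms := PySem.Set.ofList (nd.getD bk [])
      let different' := if !(PySem.Set.equal b_forms n_forms) then
          different ++ [(bk, PySem.List.sorted (PySem.Set.diff b_forms n_forms) (fun x => x),
                             PySem.List.sorted (PySem.Set.diff n_forms b_forms) (fun x => x))]
        else different
      cvLoop bd nd bs ns missed extra different'
  termination_by bs ns _ _ _ => bs.length + ns.length

def compare_vocabularies_alt (baseline : List (String × List String)) (new : List (String × List String)) : List String × List String × (List (String × List String × List String)) :=
  let bd := PySem.Dict.ofList baseline
  let nd := PySem.Dict.ofList new
  let b_keys := PySem.List.sorted bd.keys (fun x => x)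
  let n_keys := PySem.List.sorted nd.keys (fun x => x)
  cvLoop bd nd b_keys n_keys [] [] []

-- ===== PRECONDITION & SPEC =====
def Spec_compare_vocabularies (baseline : List (String × List String)) (new : List (String × List String)) (out : List String × List String × (List (String × List String × List String))) : Prop := out = compare_vocabularies_alt baseline new
instance (baseline : List (String × List String)) (new : List (String × List String)) (out : List String × List String × (List (String × List String × List String))) : Decidable (Spec_compare_vocabularies baseline new out) := by unfold Spec_compare_vocabularies; infer_instance

-- ===== CLAIM (what is proved, stated in full; the proofs are below) =====
def Claim_equal_compare_vocabularies : Prop := ∀ (baseline : List (String × List String)) (new : List (String × List String)), Dom_compare_vocabularies baseline new → Spec_compare_vocabularies baseline new (compare_vocabularies baseline new)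

-- ===== LEMMAS AND PROOFS =====

-- per-root predicate and result of the shared-root comparison (proof-only helpers)
def cvP (bd nd : PySem.Dict String (List String)) (root : String) : Bool :=
  !(PySem.Set.equal (PySem.Set.ofList (bd.getD root [])) (PySem.Set.ofList (nd.getD root [])))

def cvF (bd nd : PySem.Dict String (List String)) (root : String) : String × List String × List String :=
  (root, PySem.List.sorted (PySem.Set.diff (PySem.Set.ofList (bd.getD root [])) (PySem.Set.ofList (nd.getD root []))) (fun x => x),
         PySem.List.sorted (PySem.Set.diff (PySem.Set.ofList (nd.getD root [])) (PySem.Set.ofList (bd.getD root []))) (fun x => x))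

-- the merge loop classifies each baseline key against the new keys in one pass:
-- its three accumulators end up as the two filtered key lists and the per-shared-root diffs
lemma cvLoop_spec (bd nd : PySem.Dict String (List String)) :
    ∀ (bs ns m e : List String) (dd : List (String × List String × List String)),
    bs.Pairwise (· < ·) → ns.Pairwise (· < ·) →
    cvLoop bd nd bs ns m e dd =
      (m ++ bs.filter (fun x => !ns.contains x),
       e ++ ns.filter (fun x => !bs.contains x),
       dd ++ ((bs.filter (fun x => ns.contains x)).filter (cvP bd nd)).map (cvF bd nd)) := by
  intro bs
  induction bs with
  | nil => intro ns m e dd _ _; cases ns <;> simp [cvLoop]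
  | cons bk bs ihb =>
    intro ns
    induction ns with
    | nil => intro m e dd _ _; simp [cvLoop]
    | cons nk ns ihn =>
      intro m e dd hbs hns
      have hbk : ∀ x ∈ bs, bk < x := (List.pairwise_cons.mp hbs).1
      have hnk : ∀ x ∈ ns, nk < x := (List.pairwise_cons.mp hns).1
      have hbs' := (List.pairwise_cons.mp hbs).2
      have hns' := (List.pairwise_cons.mp hns).2
      rcases lt_trichotomy bk nk with h | h | h
      · -- bk < nk : bk goes to missed
        have hne : bk ≠ nk := ne_of_lt h
        have hnin : bk ∉ ns := fun hm => absurd (h.trans (hnk _ hm)) (lt_irrefl _)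
        rw [cvLoop, if_pos h, ihb (nk :: ns) (m ++ [bk]) e dd hbs' hns]
        have hcg : List.filter (fun x => !(bk :: bs).contains x) (nk :: ns)
            = List.filter (fun x => !bs.contains x) (nk :: ns) := by
          refine List.filter_congr (fun x hx => ?_)
          have hxne : x ≠ bk := by
            rcases List.mem_cons.mp hx with rfl | hx
            · exact hne.symm
            · exact fun hc => absurd (hc ▸ h.trans (hnk _ hx)) (lt_irrefl _)
          simp [hxne]
        refine Prod.ext ?_ (Prod.ext ?_ ?_)
        · simp [List.filter_cons, hne, hnin]
        · simp only; rw [hcg]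
        · simp [List.filter_cons, hne, hnin]
      · -- bk = nk : shared root
        subst h
        rw [cvLoop, if_neg (lt_irrefl bk), if_neg (lt_irrefl bk)]
        simp only
        rw [ihb ns m e _ hbs' hns']
        have hcgb : List.filter (fun x => !(bk :: ns).contains x) bs
            = List.filter (fun x => !ns.contains x) bs := by
          refine List.filter_congr (fun x hx => ?_)
          have : x ≠ bk := fun hc => absurd (hc ▸ hbk _ hx) (lt_irrefl _)
          simp [this]
        have hcgb2 : List.filter (fun x => (bk :: ns).contains x) bs
            = List.filter (fun x => ns.contains x) bs := by
          refine List.filter_congr (fun x hx => ?_)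
          have : x ≠ bk := fun hc => absurd (hc ▸ hbk _ hx) (lt_irrefl _)
          simp [this]
        have hcgn : List.filter (fun x => !(bk :: bs).contains x) ns
            = List.filter (fun x => !bs.contains x) ns := by
          refine List.filter_congr (fun x hx => ?_)
          have : x ≠ bk := fun hc => absurd (hc ▸ hnk _ hx) (lt_irrefl _)
          simp [this]
        refine Prod.ext ?_ (Prod.ext ?_ ?_)
        · simp only [List.filter_cons]
          have hb : (!(bk :: ns).contains bk) = false := by simp
          rw [hb, if_neg (by simp), hcgb]
        · simp only [List.filter_cons]
          rw [if_neg (by simp), hcgn]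
        · dsimp only
          rw [List.filter_cons, if_pos (show ((bk :: ns).contains bk) = true by simp), hcgb2]
          have hpdef : (!(PySem.Set.ofList (bd.getD bk [])).equal (PySem.Set.ofList (nd.getD bk []))) = cvP bd nd bk := rfl
          have hfdef : (bk, PySem.List.sorted ((PySem.Set.ofList (bd.getD bk [])).diff (PySem.Set.ofList (nd.getD bk []))) (fun x => x),
              PySem.List.sorted ((PySem.Set.ofList (nd.getD bk [])).diff (PySem.Set.ofList (bd.getD bk []))) (fun x => x)) = cvF bd nd bk := rfl
          rw [hpdef, hfdef, List.filter_cons]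
          by_cases hp : cvP bd nd bk = true
          · rw [if_pos hp, if_pos hp, List.map_cons, List.append_assoc]; rfl
          · rw [if_neg hp, if_neg hp]
      · -- nk < bk : nk goes to extra
        have hne : nk ≠ bk := ne_of_lt h
        have hnin : nk ∉ bs := fun hm => absurd (h.trans (hbk _ hm)) (lt_irrefl _)
        rw [cvLoop, if_neg (asymm h), if_pos h, ihn m (e ++ [nk]) dd hbs hns']
        have hcg : List.filter (fun x => !(nk :: ns).contains x) (bk :: bs)
            = List.filter (fun x => !ns.contains x) (bk :: bs) := by
          refine List.filter_congr (fun x hx => ?_)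
          have hxne : x ≠ nk := by
            rcases List.mem_cons.mp hx with rfl | hx
            · exact hne.symm
            · exact fun hc => absurd (hc ▸ h.trans (hbk _ hx)) (lt_irrefl _)
          simp [hxne]
        have hcg2 : List.filter (fun x => (nk :: ns).contains x) (bk :: bs)
            = List.filter (fun x => ns.contains x) (bk :: bs) := by
          refine List.filter_congr (fun x hx => ?_)
          have hxne : x ≠ nk := by
            rcases List.mem_cons.mp hx with rfl | hx
            · exact hne.symm
            · exact fun hc => absurd (hc ▸ h.trans (hbk _ hx)) (lt_irrefl _)
          simp [hxne]
        refine Prod.ext ?_ (Prod.ext ?_ ?_)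
        · rw [hcg]
        · simp [List.filter_cons, hne, hnin]
        · rw [hcg2]

lemma cv_sorted_filter (K : List String) (hK : K.Nodup) (q : String → Bool) :
    PySem.List.sorted (K.filter q) (fun x => x) = (PySem.List.sorted K (fun x => x)).filter q := by
  apply PySem.List.sorted_eq_of_perm_of_pairwise_lt
  · exact (PySem.List.sorted_perm K _ _).filter q
  · have h := PySem.List.sorted_ofList_pairwise_lt (κ := String) K
    rw [PySem.Set.ofList_eq_self_of_nodup K hK] at h
    exact h.filter q

lemma cv_sorted_lt (K : List String) (hK : K.Nodup) :
    (PySem.List.sorted K (fun x => x)).Pairwise (· < ·) := by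
  have h := PySem.List.sorted_ofList_pairwise_lt (κ := String) K
  rwa [PySem.Set.ofList_eq_self_of_nodup K hK] at h

lemma compare_vocabularies_eq_alt (baseline new : List (String × List String)) :
    compare_vocabularies baseline new = compare_vocabularies_alt baseline new := by
  unfold compare_vocabularies compare_vocabularies_alt
  dsimp only
  have hKB := PySem.Dict.nodup_keys_ofList baseline
  have hKN := PySem.Dict.nodup_keys_ofList new
  rw [cvLoop_spec _ _ _ _ _ _ _ (cv_sorted_lt _ hKB) (cv_sorted_lt _ hKN)]
  rw [PySem.Set.ofList_eq_self_of_nodup _ hKB, PySem.Set.ofList_eq_self_of_nodup _ hKN]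
  simp only [PySem.Set.diff, PySem.Set.inter]
  rw [PySem.List.foldl_append_if]
  have hcB : ∀ x, (PySem.List.sorted (PySem.Dict.ofList baseline).keys (fun x => x)).contains x
      = (PySem.Dict.ofList baseline).keys.contains x :=
    fun x => List.Perm.contains_eq (PySem.List.sorted_perm _ _ _)
  have hcN : ∀ x, (PySem.List.sorted (PySem.Dict.ofList new).keys (fun x => x)).contains x
      = (PySem.Dict.ofList new).keys.contains x :=
    fun x => List.Perm.contains_eq (PySem.List.sorted_perm _ _ _)
  refine Prod.ext ?_ (Prod.ext ?_ ?_)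
  · dsimp only
    rw [cv_sorted_filter _ hKB, List.nil_append]
    exact List.filter_congr (fun x _ => by rw [PySem.Set.contains_eq_listContains, hcN])
  · dsimp only
    rw [cv_sorted_filter _ hKN, List.nil_append]
    exact List.filter_congr (fun x _ => by rw [PySem.Set.contains_eq_listContains, hcB])
  · dsimp only
    rw [cv_sorted_filter _ hKB, List.nil_append]
    rw [List.filter_congr (fun x _ => (by rw [PySem.Set.contains_eq_listContains, hcN] :
      ((PySem.List.sorted (PySem.Dict.ofList new).keys fun x => x).contains x : Bool)
        = PySem.Set.contains (PySem.Dict.ofList new).keys x))]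
    rfl


-- ===== VERDICT (by name: the statement is the Claim_ definition above) =====
theorem compare_vocabularies_spec : Claim_equal_compare_vocabularies := by
  intro baseline new _
  exact compare_vocabularies_eq_alt baseline new
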